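-- pv_equiv track=rewrite | github.com/Christophe-Caron/Advent-of-Code | Advent_Of_Code_Day_1/Advent_code_day_1_P.2.py | check_mult
-- ===== SOURCE A (Python) =====
-- def check_mult(left,right):
--     res_list=[]
--     for el in left:
--         mult=0
--         result=0
--         for idx,j in enumerate(right):
--             if j==el:
--                 mult+=1
--         result=el*mult
--         res_list.append(result)
--     return res_list
-- ===== SOURCE B (Python) =====
-- def check_mult(left, right):
--     # Sort a copy of `right` once; for each el, its frequency is the width of the
--     # block of equal elements, found by two binary searches (bisect_left/bisect_right,
--     # written out by hand since no imports are used).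
--     s = sorted(right)
--
--     def prefix_len(strict, x):
--         # number of elements of s that are < x (strict=True) / <= x (strict=False)
--         lo, hi = 0, len(s)
--         while lo < hi:
--             mid = (lo + hi) // 2
--             if (s[mid] < x) if strict else (s[mid] <= x):
--                 lo = mid + 1
--             else:
--                 hi = mid
--         return lo
--
--     return [el * (prefix_len(False, el) - prefix_len(True, el)) for el in left]
-- ===== Notes on version B (the rewrite author's own statement) =====
-- stated objective: faster
-- what changed: Replaces A's inner linear rescan of `right` for every element of `left` with a single sort of a copy of `right` followed by two binary searches per element (bisect_right - bisect_left gives the frequency).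
import Mathlib
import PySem

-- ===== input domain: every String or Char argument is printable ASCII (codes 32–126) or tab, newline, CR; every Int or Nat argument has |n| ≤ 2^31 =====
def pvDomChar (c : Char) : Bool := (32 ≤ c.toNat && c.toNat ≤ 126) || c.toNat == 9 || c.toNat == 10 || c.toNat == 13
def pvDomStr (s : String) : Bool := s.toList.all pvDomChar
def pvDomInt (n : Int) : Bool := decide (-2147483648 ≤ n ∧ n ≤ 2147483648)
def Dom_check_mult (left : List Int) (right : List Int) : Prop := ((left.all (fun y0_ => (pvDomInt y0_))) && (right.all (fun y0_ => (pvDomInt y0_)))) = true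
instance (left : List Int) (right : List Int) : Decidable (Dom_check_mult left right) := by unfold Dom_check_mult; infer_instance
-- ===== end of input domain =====

-- B sorts a copy of `right` once and finds each element's frequency with two binary searches
-- (bisect_right - bisect_left), instead of A's inner linear rescan of `right` per element.


-- ===== PORT A =====
def check_mult (left : List Int) (right : List Int) : List Int :=
  left.foldl (fun res_list el =>
    let mult : Int :=
      (PySem.List.enumerate right).foldl (fun mult p => if p.2 == el then mult + 1 else mult) 0
    let result := el * mult
    res_list ++ [result]) []

-- ===== PORT B =====
-- Source B's hand-written `prefix_len(strict, x)` loop is exactly the bisect_left (strict=True)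
-- / bisect_right (strict=False) binary search, ported as the PySem primitives that own it.
def check_mult_alt (left : List Int) (right : List Int) : List Int :=
  let s := PySem.List.sorted right (fun x => x) false
  left.map (fun el =>
    el * ((PySem.List.bisectRight s el : Int) - (PySem.List.bisectLeft s el : Int)))

-- ===== PRECONDITION & SPEC =====
def Spec_check_mult (left : List Int) (right : List Int) (out : List Int) : Prop := out = check_mult_alt left right
instance (left : List Int) (right : List Int) (out : List Int) : Decidable (Spec_check_mult left right out) := by unfold Spec_check_mult; infer_instance

-- ===== CLAIM (what is proved, stated in full; the proofs are below) =====
def Claim_equal_check_mult : Prop := ∀ (left : List Int) (right : List Int), Dom_check_mult left right → Spec_check_mult left right (check_mult left right)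

-- ===== LEMMAS AND PROOFS =====

-- A's inner enumerate-loop counts the occurrences of el in xs.
lemma foldl_enumerate_count (el : Int) (xs : List Int) (s a : Int) :
    (PySem.List.enumerate xs s).foldl (fun m p => if p.2 == el then m + 1 else m) a
      = a + (xs.count el : Int) := by
  induction xs generalizing s a with
  | nil => simp [PySem.List.enumerate_nil]
  | cons x xs ih =>
      rw [PySem.List.enumerate_cons, List.foldl_cons]
      by_cases h : x = el
      · rw [if_pos (by simp [h]), ih, List.count_cons, if_pos (by simp [h])]
        push_cast; ring
      · rw [if_neg (by simp [h]), ih, List.count_cons, if_neg (by simp [h])]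
        simp

-- On a sorted list, bisectRight - bisectLeft is the multiplicity.
lemma bisect_diff_eq_count (s : List Int) (el : Int)
    (hs : s.Pairwise (fun a b => a ≤ b)) :
    (PySem.List.bisectRight s el : Int) - (PySem.List.bisectLeft s el : Int)
      = (s.count el : Int) := by
  obtain ⟨hr_le, hr_lo, hr_hi⟩ := PySem.List.bisectRight_spec s el hs
  obtain ⟨hl_le, hl_lo, hl_hi⟩ := PySem.List.bisectLeft_spec s el hs
  set br := PySem.List.bisectRight s el with hbr
  set bl := PySem.List.bisectLeft s el with hbl
  have hble : bl ≤ br := by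
    by_contra h
    push Not at h
    have hbrlen : br < s.length := lt_of_lt_of_le h hl_le
    have h1 := hl_lo br hbrlen h
    have h2 := hr_hi br hbrlen (le_refl br)
    exact lt_irrefl el (h2.trans h1)
  have hcount : s.count el = br - bl := by
    have hdecomp : s = s.take bl ++ ((s.drop bl).take (br - bl) ++ s.drop br) := by
      conv_lhs => rw [← List.take_append_drop bl s]
      congr 1
      conv_lhs => rw [← List.take_append_drop (br - bl) (s.drop bl)]
      congr 1
      rw [List.drop_drop]
      congr 1
      omega
    rw [hdecomp, List.count_append, List.count_append]
    have h1 : (s.take bl).count el = 0 := by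
      rw [List.count_eq_zero]
      intro hm
      obtain ⟨i, hi, hget⟩ := List.mem_iff_getElem.mp hm
      rw [List.length_take] at hi
      have hilen : i < s.length := lt_of_lt_of_le hi (le_trans (min_le_right _ _) (le_refl _))
      rw [List.getElem_take] at hget
      have := hl_lo i hilen (lt_of_lt_of_le hi (min_le_left _ _))
      omega
    have h3 : (s.drop br).count el = 0 := by
      rw [List.count_eq_zero]
      intro hm
      obtain ⟨i, hi, hget⟩ := List.mem_iff_getElem.mp hm
      rw [List.length_drop] at hi
      rw [List.getElem_drop] at hget
      have := hr_hi (br + i) (by omega) (by omega)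
      omega
    have h2 : ((s.drop bl).take (br - bl)).count el = (br - bl : Nat) := by
      have hlen : ((s.drop bl).take (br - bl)).length = br - bl := by
        rw [List.length_take, List.length_drop]
        omega
      have hall : ∀ b ∈ (s.drop bl).take (br - bl), el = b := by
        intro b hb
        obtain ⟨i, hi, hget⟩ := List.mem_iff_getElem.mp hb
        rw [List.getElem_take, List.getElem_drop] at hget
        rw [hlen] at hi
        have hidx : bl + i < s.length := by omega
        have hle := hr_lo (bl + i) hidx (by omega)
        have hge := hl_hi (bl + i) hidx (by omega)
        omega
      rw [List.count_eq_length.mpr hall, hlen]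
    omega
  rw [hcount]
  omega

-- ===== VERDICT (by name: the statement is the Claim_ definition above) =====
theorem check_mult_spec : Claim_equal_check_mult := by
  intro left right _
  unfold Spec_check_mult check_mult check_mult_alt
  rw [PySem.List.foldl_append_singleton_eq_map]
  refine List.map_congr_left (fun el _ => ?_)
  rw [foldl_enumerate_count]
  rw [bisect_diff_eq_count _ _ (PySem.List.sorted_pairwise right (fun x => x) )]
  rw [List.Perm.count_eq (PySem.List.sorted_perm right (fun x => x) false)]
  simp
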